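-- pv_equiv track=rewrite | github.com/totoLab/code-ingegneria-informatica | fondamenti1/simulazioni_esame/29062018/es2.py | esamina_lista
-- ===== SOURCE A (Python) =====
-- def esamina_lista(L, t):
--     for x in L:
--         if x > t:
--             return 0
--
--     k = len(L)
--     ok = True
--     while k > 0 and ok:
--         for i in range(0,len(L) - k):
--             sottolista = L[i:i+k+1]
--             if sum(sottolista) > t:
--                 ok = False
--         k -= 1
--
--     return k
-- ===== SOURCE B (Python) =====
-- def esamina_lista(L, t):
--     if any(x > t for x in L):
--         return 0
--     n = len(L)
--     P = [0]
--     s = 0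
--     for x in L:
--         s += x
--         P.append(s)
--     for m in range(n, 1, -1):
--         if any(P[i + m] - P[i] > t for i in range(n - m + 1)):
--             return m - 2
--     return 0
-- ===== Notes on version B (the rewrite author's own statement) =====
-- stated objective: faster
-- what changed: B builds a prefix-sum array once so each window sum is O(1) and returns as soon as the first (largest) violating window length is found, replacing A's O(n^3) slice-and-sum scan with a never-reset flag.
import Mathlib
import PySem

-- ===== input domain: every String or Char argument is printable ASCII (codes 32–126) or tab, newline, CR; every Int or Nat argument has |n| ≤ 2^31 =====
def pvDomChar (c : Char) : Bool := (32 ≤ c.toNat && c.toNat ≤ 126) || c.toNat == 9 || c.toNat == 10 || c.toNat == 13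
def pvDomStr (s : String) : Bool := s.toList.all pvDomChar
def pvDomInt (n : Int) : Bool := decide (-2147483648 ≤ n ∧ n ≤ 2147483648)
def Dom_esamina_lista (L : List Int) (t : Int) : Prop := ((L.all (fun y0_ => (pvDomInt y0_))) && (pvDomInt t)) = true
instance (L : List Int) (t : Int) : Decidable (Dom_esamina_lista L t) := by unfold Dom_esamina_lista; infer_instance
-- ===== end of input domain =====

-- B replaces A's O(n^3) slice-and-sum flag loop by a prefix-sum array giving O(1)
-- window sums and an early-return descending scan: O(n^2), measurably faster.

-- ===== PORT A =====
-- inner 'for i in range(0, len(L) - k)' with the ok flag (k is the Python variable)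
def pvAInner (L : List Int) (t : Int) (k : Nat) (ok : Bool) : Bool :=
  (PySem.List.pyRange 0 ((L.length : Int) - (k : Int)) 1).foldl
    (fun acc i =>
      if (PySem.List.slice L (some i) (some (i + (k : Int) + 1))).sum > t then false else acc)
    ok

-- 'while k > 0 and ok: inner; k -= 1 ; return k'
def pvAWhile (L : List Int) (t : Int) : Nat → Bool → Int
  | 0, _ => 0
  | k + 1, ok => if ok then pvAWhile L t k (pvAInner L t (k + 1) ok) else ((k : Int) + 1)

def esamina_lista (L : List Int) (t : Int) : Int :=
  if L.any (fun x => decide (x > t)) then 0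
  else pvAWhile L t L.length true

-- ===== PORT B =====
-- 'P = [0]; s = 0; for x in L: s += x; P.append(s)'
def pvPrefix (L : List Int) : List Int :=
  (L.foldl (fun (p : List Int × Int) x => (p.1 ++ [p.2 + x], p.2 + x)) (([0] : List Int), (0 : Int))).1

-- 'for m in range(n, 1, -1): if any(P[i+m] - P[i] > t for i in range(n - m + 1)): return m - 2'
-- P-indexing uses getD: every index i, i+m used is in range (i ≤ n - m, m ≤ n), so getD is exact.
def pvBLoop (P : List Int) (t : Int) (n : Nat) : Nat → Int
  | 0 => 0
  | 1 => 0
  | m + 2 =>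
    if (List.range (n - (m + 2) + 1)).any
        (fun i => decide (P.getD (i + (m + 2)) 0 - P.getD i 0 > t)) then
      ((m + 2 : Nat) : Int) - 2
    else pvBLoop P t n (m + 1)

def esamina_lista_alt (L : List Int) (t : Int) : Int :=
  if L.any (fun x => decide (x > t)) then 0
  else pvBLoop (pvPrefix L) t L.length L.length

-- ===== PRECONDITION & SPEC =====
def Spec_esamina_lista (L : List Int) (t : Int) (out : Int) : Prop := out = esamina_lista_alt L t
instance (L : List Int) (t : Int) (out : Int) : Decidable (Spec_esamina_lista L t out) := by unfold Spec_esamina_lista; infer_instance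

-- ===== CLAIM (what is proved, stated in full; the proofs are below) =====
def Claim_equal_esamina_lista : Prop := ∀ (L : List Int) (t : Int), Dom_esamina_lista L t → Spec_esamina_lista L t (esamina_lista L t)

-- ===== LEMMAS AND PROOFS =====

-- 'there is a window of length m whose sum exceeds t' (the condition both loops test)
def pvBad (L : List Int) (t : Int) (m : Nat) : Bool :=
  (List.range (L.length + 1 - m)).any (fun i => decide (t < ((L.drop i).take m).sum))

-- the list of partial sums s+x1, s+x1+x2, … (what B's building loop produces)
def pvPref (s : Int) : List Int → List Int
  | [] => []
  | x :: xs => (s + x) :: pvPref (s + x) xs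

-- a flag that is set to false once a test fires and never reset
lemma pvFoldlFlag {α : Type} (P : α → Prop) [DecidablePred P] (l : List α) (ok : Bool) :
    l.foldl (fun acc x => if P x then false else acc) ok
      = (ok && !(l.any (fun x => decide (P x)))) := by
  induction l generalizing ok with
  | nil => simp
  | cons c l ih =>
    rw [List.foldl_cons, List.any_cons]
    by_cases h : P c
    · rw [if_pos h, ih]; simp [h]
    · rw [if_neg h, ih]; simp [h]

lemma pvInner_eq (L : List Int) (t : Int) (m : Nat) (ok : Bool) :
    pvAInner L t m ok = (ok && !(pvBad L t (m + 1))) := by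
  unfold pvAInner
  rw [pvFoldlFlag]
  have hany : ((PySem.List.pyRange 0 ((L.length : Int) - (m : Int)) 1).any
      (fun i => decide ((PySem.List.slice L (some i) (some (i + (m : Int) + 1))).sum > t)))
      = pvBad L t (m + 1) := by
    unfold pvBad
    by_cases h : m < L.length
    · have hcast : (L.length : Int) - (m : Int) = ((L.length - m : Nat) : Int) := by omega
      rw [hcast, PySem.List.pyRange_one]
      simp only [Int.sub_zero, Int.toNat_natCast, List.any_map]
      have hrange : L.length + 1 - (m + 1) = L.length - m := by omega
      rw [hrange]
      apply PySem.List.any_congr_mem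
      intro k _
      simp only [Function.comp]
      have hs : PySem.List.slice L (some ((0 : Int) + (k : Int)))
          (some ((0 : Int) + (k : Int) + (m : Int) + 1)) = (L.drop k).take (m + 1) := by
        have hb : (0 : Int) + (k : Int) + (m : Int) + 1
            = ((k : Nat) : Int) + ((m + 1 : Nat) : Int) := by push_cast; ring
        rw [hb]
        have ha : (0 : Int) + (k : Int) = ((k : Nat) : Int) := by ring
        rw [ha]
        exact PySem.List.slice_natCast_add L k (m + 1)
      simp only [hs]
    · have h1 : (L.length : Int) - (m : Int) ≤ 0 := by omega
      rw [PySem.List.pyRange_one_eq_nil h1]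
      have h2 : L.length + 1 - (m + 1) = 0 := by omega
      rw [h2]
      simp
  rw [hany]

lemma pvPrefixFold (L : List Int) (ps : List Int) (s : Int) :
    L.foldl (fun (p : List Int × Int) x => (p.1 ++ [p.2 + x], p.2 + x)) (ps, s)
      = (ps ++ pvPref s L, s + L.sum) := by
  induction L generalizing ps s with
  | nil => simp [pvPref]
  | cons x xs ih =>
    simp only [List.foldl_cons, pvPref, List.sum_cons]
    rw [ih]
    refine Prod.ext ?_ ?_
    · simp
    · simp; ring

lemma pvPrefGet (L : List Int) (s : Int) (i : Nat) (h : i ≤ L.length) :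
    (s :: pvPref s L).getD i 0 = s + (L.take i).sum := by
  induction L generalizing s i with
  | nil =>
    have hi : i = 0 := by simpa using h
    subst hi
    simp
  | cons x xs ih =>
    cases i with
    | zero => simp
    | succ j =>
      simp only [pvPref, List.getD_cons_succ, List.take_succ_cons, List.sum_cons]
      rw [ih (s + x) j (by simpa using h)]
      ring

lemma pvPrefixGet (L : List Int) (i : Nat) (h : i ≤ L.length) :
    (pvPrefix L).getD i 0 = (L.take i).sum := by
  unfold pvPrefix
  rw [pvPrefixFold]
  simpa using pvPrefGet L 0 i h

lemma pvGuard_eq (L : List Int) (t : Int) (m : Nat) (hn : m ≤ L.length) :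
    ((List.range (L.length - m + 1)).any
        (fun i => decide ((pvPrefix L).getD (i + m) 0 - (pvPrefix L).getD i 0 > t)))
      = pvBad L t m := by
  unfold pvBad
  have hr : L.length - m + 1 = L.length + 1 - m := by omega
  rw [hr]
  apply PySem.List.any_congr_mem
  intro i hi
  have hi' : i + m ≤ L.length := by
    have := List.mem_range.mp hi; omega
  rw [pvPrefixGet L (i + m) hi', pvPrefixGet L i (by omega)]
  have hsum : (L.take (i + m)).sum = (L.take i).sum + ((L.drop i).take m).sum := by
    rw [List.take_add, List.sum_append]
  rw [decide_eq_decide]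
  constructor <;> intro <;> omega

lemma pvAWhile_false (L : List Int) (t : Int) (k : Nat) :
    pvAWhile L t k false = (k : Int) := by
  cases k <;> simp [pvAWhile]

lemma pvMain (L : List Int) (t : Int) :
    ∀ k : Nat, k + 1 ≤ L.length →
      pvAWhile L t k true = pvBLoop (pvPrefix L) t L.length (k + 1) := by
  intro k
  induction k with
  | zero => intro _; rfl
  | succ k ih =>
    intro h
    show pvAWhile L t (k + 1) true = pvBLoop (pvPrefix L) t L.length (k + 2)
    rw [pvAWhile, if_pos rfl, pvInner_eq, pvBLoop, pvGuard_eq L t (k + 2) (by omega)]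
    cases hb : pvBad L t (k + 2) with
    | false => simpa using ih (by omega)
    | true =>
      have hflag : (true && !true) = false := rfl
      rw [hflag, pvAWhile_false, if_pos rfl]
      push_cast; ring

-- ===== VERDICT (by name: the statement is the Claim_ definition above) =====
theorem esamina_lista_spec : Claim_equal_esamina_lista := by
  intro L t _
  unfold Spec_esamina_lista esamina_lista esamina_lista_alt
  by_cases h : L.any (fun x => decide (x > t))
  · rw [if_pos h, if_pos h]
  · rw [if_neg h, if_neg h]
    cases hL : L.length with
    | zero => rfl
    | succ k =>
      rw [pvAWhile, if_pos rfl, pvInner_eq]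
      have hb : pvBad L t (k + 2) = false := by
        unfold pvBad
        have h0 : L.length + 1 - (k + 2) = 0 := by omega
        rw [h0]
        rfl
      rw [hb]
      have hflag : (true && !false) = true := rfl
      rw [hflag]
      have hm := pvMain L t k (by omega)
      rw [hL] at hm
      exact hm
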